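-- pv_equiv track=rewrite | github.com/EmanEmadFarghaly/Number-Scrabble | CS112_A1_T2_Game#2_20230619.py | game_score
-- ===== SOURCE A (Python) =====
-- def game_score(choiceslist):
--     if len(choiceslist) == 3:
--         if sum(choiceslist) == 15:
--             return True
--     elif len(choiceslist) == 4:
--         for i in choiceslist:
--             newlist = choiceslist.copy()
--             newlist.remove(i)
--             if sum(newlist) == 15:
--                 return True
-- ===== SOURCE B (Python) =====
-- def game_score(choiceslist):
--     n = len(choiceslist)
--     if n == 3 or n == 4:
--         for i in range(n):
--             for j in range(i + 1, n):
--                 for k in range(j + 1, n):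
--                     if choiceslist[i] + choiceslist[j] + choiceslist[k] == 15:
--                         return True
-- ===== Notes on version B (the rewrite author's own statement) =====
-- stated objective: alternative
-- what changed: Replaces A's two separate length branches (direct sum for 3, a copy/remove pass per element for 4) with one uniform index-triple scan over all 3-element subsets, returning True on the first triple summing to 15 and falling through to None otherwise.
import Mathlib
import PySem

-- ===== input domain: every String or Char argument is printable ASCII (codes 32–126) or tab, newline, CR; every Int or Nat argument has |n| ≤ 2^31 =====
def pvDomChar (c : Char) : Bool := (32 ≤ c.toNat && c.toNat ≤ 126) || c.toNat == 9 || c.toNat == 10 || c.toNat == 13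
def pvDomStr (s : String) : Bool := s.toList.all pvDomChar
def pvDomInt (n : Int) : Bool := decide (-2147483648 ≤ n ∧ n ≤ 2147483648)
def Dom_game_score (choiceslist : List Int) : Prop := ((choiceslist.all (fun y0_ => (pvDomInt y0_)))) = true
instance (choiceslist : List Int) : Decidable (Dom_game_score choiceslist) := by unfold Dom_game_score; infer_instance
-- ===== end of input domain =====

-- B replaces A's two separate length branches (direct sum / per-element copy+remove) by one
-- uniform scan over all index triples i<j<k; alternative decomposition, same cost (n ≤ 4).

-- ===== PORT A =====
-- the 'for i in choiceslist' loop of the length-4 branch: early 'return True', falls off to None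
def gameScoreLoopA (orig : List Int) : List Int → Option Bool
  | [] => none
  | i :: rest =>
    match PySem.List.remove? orig i with
    | none => none   -- Python ValueError (unreachable: i is drawn from orig)
    | some newlist => if newlist.sum == 15 then some true else gameScoreLoopA orig rest

def game_score (choiceslist : List Int) : Option Bool :=
  if choiceslist.length == 3 then
    if choiceslist.sum == 15 then some true else none
  else if choiceslist.length == 4 then
    gameScoreLoopA choiceslist choiceslist
  else none

-- ===== PORT B =====
-- triple nested 'for … in range' loops with early 'return True'; indices are always in range,
-- so xs[i] is ported as pyGetD with an arbitrary default
def game_score_alt (choiceslist : List Int) : Option Bool :=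
  let n : Int := choiceslist.length
  if n == 3 || n == 4 then
    if (PySem.List.pyRange 0 n 1).any (fun i =>
         (PySem.List.pyRange (i+1) n 1).any (fun j =>
           (PySem.List.pyRange (j+1) n 1).any (fun k =>
             PySem.List.pyGetD choiceslist i 0 + PySem.List.pyGetD choiceslist j 0 +
               PySem.List.pyGetD choiceslist k 0 == 15)))
    then some true else none
  else none

-- ===== PRECONDITION & SPEC =====
def Spec_game_score (choiceslist : List Int) (out : Option Bool) : Prop := out = game_score_alt choiceslist
instance (choiceslist : List Int) (out : Option Bool) : Decidable (Spec_game_score choiceslist out) := by unfold Spec_game_score; infer_instance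

-- ===== CLAIM (what is proved, stated in full; the proofs are below) =====
def Claim_equal_game_score : Prop := ∀ (choiceslist : List Int), Dom_game_score choiceslist → Spec_game_score choiceslist (game_score choiceslist)

-- ===== LEMMAS AND PROOFS =====

theorem sum_erase_of_mem (l : List Int) (a : Int) (h : a ∈ l) : (l.erase a).sum = l.sum - a := by
  have hp := (List.perm_cons_erase h).sum_eq
  simp at hp; omega

-- A's length-4 loop returns True iff some element can be removed leaving sum 15
theorem loopA_char (orig : List Int) : ∀ (rest : List Int), (∀ i ∈ rest, i ∈ orig) →
    gameScoreLoopA orig rest =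
      if rest.any (fun i => orig.sum - i == 15) then some true else none := by
  intro rest
  induction rest with
  | nil => intro _; rfl
  | cons x xs ih =>
    intro h
    have hx : x ∈ orig := h x (by simp)
    rw [gameScoreLoopA, PySem.List.remove?_eq_some_erase orig x hx]
    simp only [sum_erase_of_mem orig x hx, List.any_cons]
    by_cases hs : orig.sum - x = 15
    · simp [hs]
    · simp only [ih (fun i hi => h i (List.mem_cons_of_mem _ hi))]
      simp [hs]

-- concrete range values used to evaluate B's nested loops
theorem r03 : PySem.List.pyRange 0 3 1 = [0, 1, 2] := by decide
theorem r13 : PySem.List.pyRange 1 3 1 = [1, 2] := by decide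
theorem r23 : PySem.List.pyRange 2 3 1 = [2] := by decide
theorem r33 : PySem.List.pyRange 3 3 1 = [] := by decide
theorem r04 : PySem.List.pyRange 0 4 1 = [0, 1, 2, 3] := by decide
theorem r14 : PySem.List.pyRange 1 4 1 = [1, 2, 3] := by decide
theorem r24 : PySem.List.pyRange 2 4 1 = [2, 3] := by decide
theorem r34 : PySem.List.pyRange 3 4 1 = [3] := by decide
theorem r44 : PySem.List.pyRange 4 4 1 = [] := by decide

theorem len3_case (a b c : Int) : game_score [a, b, c] = game_score_alt [a, b, c] := by
  simp only [game_score, game_score_alt]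
  norm_num [r03, r13, r23, r33, List.any_cons, List.any_nil,
    PySem.List.pyGetD, PySem.List.pyGet?, PySem.List.pyIdx?]
  split_ifs <;> first | rfl | (exfalso; simp_all; omega)

theorem len4_case (a b c d : Int) : game_score [a, b, c, d] = game_score_alt [a, b, c, d] := by
  simp only [game_score, game_score_alt]
  rw [show ([a,b,c,d] : List Int).length = 4 from rfl]
  norm_num [loopA_char [a,b,c,d] [a,b,c,d] (fun i hi => hi), r04, r14, r24, r34, r44,
    List.any_cons, List.any_nil, PySem.List.pyGetD, PySem.List.pyGet?, PySem.List.pyIdx?]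
  split_ifs <;> first | rfl | (exfalso; simp_all; omega)

-- ===== VERDICT (by name: the statement is the Claim_ definition above) =====
theorem game_score_spec : Claim_equal_game_score := by
  intro xs _
  unfold Spec_game_score
  match xs with
  | [] => rfl
  | [a] => rfl
  | [a, b] => rfl
  | [a, b, c] => exact len3_case a b c
  | [a, b, c, d] => exact len4_case a b c d
  | a :: b :: c :: d :: e :: rest =>
    have h3 : ((a :: b :: c :: d :: e :: rest).length == 3) = false := by
      simp [List.length_cons]
    have h4 : ((a :: b :: c :: d :: e :: rest).length == 4) = false := by
      simp [List.length_cons]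
    have h34 : ((((a :: b :: c :: d :: e :: rest).length : Int) == 3) ||
        (((a :: b :: c :: d :: e :: rest).length : Int) == 4)) = false := by
      simp [List.length_cons]; omega
    simp only [game_score, game_score_alt, h3, h4, h34, if_false, Bool.false_eq_true]
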